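-- pv_equiv track=rewrite | github.com/johnnychhsu/codejam | 2019_Session/qualification_round/ForegoneSolution.py | find
-- ===== SOURCE A (Python) =====
-- def find(N):
--     record = []
--     num = []
--     while N > 0:
--         r = N % 10
--         if r != 4:
--             record.append(r)
--             num.append(1)
--         else:
--             record.append(2)
--             num.append(2)
--         N = N // 10
--     A = B = 0
--     for i, n in enumerate(record):
--         A += 10**i * n
--         num[i] -= 1
--         if num[i] > 0:
--             B += 10**i * n
--             num[i] -= 1
--     return A, B
-- ===== SOURCE B (Python) =====
-- def find(N):
--     if N <= 0:
--         return 0, 0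
--     a, b = find(N // 10)
--     d = N % 10
--     if d == 4:
--         return 10 * a + 2, 10 * b + 2
--     return 10 * a + d, 10 * b
-- ===== Notes on version B (the rewrite author's own statement) =====
-- stated objective: simpler
-- what changed: Replaces A's two-pass scheme (build digit and use-count lists least-significant-first in a while loop, then reconstruct both results with explicit powers of ten and mutable counters in an enumerate loop) with a direct structural recursion on N that builds both results most-significant-digit first by shifting the accumulator one decimal place per digit, with no lists, counters or power computations.
import Mathlib
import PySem

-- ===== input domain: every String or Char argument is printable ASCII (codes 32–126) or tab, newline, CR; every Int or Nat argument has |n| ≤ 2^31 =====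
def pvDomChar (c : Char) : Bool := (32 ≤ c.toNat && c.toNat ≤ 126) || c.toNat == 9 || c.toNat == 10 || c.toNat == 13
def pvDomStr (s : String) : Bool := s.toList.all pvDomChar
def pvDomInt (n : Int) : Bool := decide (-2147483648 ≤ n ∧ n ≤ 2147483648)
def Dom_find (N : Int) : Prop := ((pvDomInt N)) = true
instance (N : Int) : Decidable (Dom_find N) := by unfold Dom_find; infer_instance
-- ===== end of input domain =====

-- B replaces A's two lists + 10**i reconstruction by one structural recursion on N; objective: simpler.

-- ===== PORT A =====
-- the while loop: append digits (4 ↦ 2) to record and a use-count (4 ↦ 2, else 1) to num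
def findLoop (N : Int) (record num : List Int) : List Int × List Int :=
  if _h : N > 0 then
    let r := PySem.Int.mod N 10
    if r ≠ 4 then
      findLoop (PySem.Int.floordiv N 10) (record ++ [r]) (num ++ [1])
    else
      findLoop (PySem.Int.floordiv N 10) (record ++ [2]) (num ++ [2])
  else (record, num)
termination_by N.toNat
decreasing_by
  all_goals
    rw [PySem.Int.floordiv_eq_ediv_of_pos (by norm_num : (0:Int) < 10)]
    omega

-- the for-loop body over enumerate(record); i ≥ 0 always, so 10**i is 10 ^ i.toNat (exact)
def findStep (s : Int × Int × List Int) (p : Int × Int) : Int × Int × List Int :=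
  let A := s.1 + 10 ^ p.1.toNat * p.2
  let num := PySem.List.pySetD s.2.2 p.1 (PySem.List.pyGetD s.2.2 p.1 0 - 1)
  if PySem.List.pyGetD num p.1 0 > 0 then
    (A, s.2.1 + 10 ^ p.1.toNat * p.2, PySem.List.pySetD num p.1 (PySem.List.pyGetD num p.1 0 - 1))
  else (A, s.2.1, num)

def find (N : Int) : Int × Int :=
  let rn := findLoop N [] []
  let st := (PySem.List.enumerate rn.1 0).foldl findStep (0, 0, rn.2)
  (st.1, st.2.1)

-- ===== PORT B =====
def find_alt (N : Int) : Int × Int :=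
  if _h : N ≤ 0 then (0, 0)
  else
    let p := find_alt (PySem.Int.floordiv N 10)
    let d := PySem.Int.mod N 10
    if d = 4 then (10 * p.1 + 2, 10 * p.2 + 2) else (10 * p.1 + d, 10 * p.2)
termination_by N.toNat
decreasing_by
  rw [PySem.Int.floordiv_eq_ediv_of_pos (by norm_num : (0:Int) < 10)]
  omega

-- ===== PRECONDITION & SPEC =====
def Spec_find (N : Int) (out : Int × Int) : Prop := out = find_alt N
instance (N : Int) (out : Int × Int) : Decidable (Spec_find N out) := by unfold Spec_find; infer_instance

-- ===== CLAIM (what is proved, stated in full; the proofs are below) =====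
def Claim_equal_find : Prop := ∀ (N : Int), Dom_find N → Spec_find N (find N)

-- ===== LEMMAS AND PROOFS =====

-- raw digits of N, least significant first ([] for N ≤ 0)
def digs (N : Int) : List Int :=
  if _h : 0 < N then PySem.Int.mod N 10 :: digs (PySem.Int.floordiv N 10) else []
termination_by N.toNat
decreasing_by
  rw [PySem.Int.floordiv_eq_ediv_of_pos (by norm_num : (0:Int) < 10)]
  omega

def rmap (d : Int) : Int := if d ≠ 4 then d else 2
def nmap (d : Int) : Int := if d ≠ 4 then 1 else 2

-- value of the A (resp. B) result from the raw digit list, least significant digit first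
def vAL : List Int → Int
  | [] => 0
  | d :: ds => rmap d + 10 * vAL ds
def vBL : List Int → Int
  | [] => 0
  | d :: ds => (if d = 4 then 2 else 0) + 10 * vBL ds

lemma find_alt_eq (N : Int) : find_alt N = (vAL (digs N), vBL (digs N)) := by
  suffices h : ∀ (n : Nat) (M : Int), M.toNat ≤ n → find_alt M = (vAL (digs M), vBL (digs M)) from
    h N.toNat N le_rfl
  intro n
  induction n with
  | zero =>
    intro M hM
    rw [find_alt, digs]
    simp [show M ≤ 0 by omega, show ¬ 0 < M by omega, vAL, vBL]
  | succ n ih =>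
    intro M hM
    by_cases h0 : M ≤ 0
    · rw [find_alt, digs]
      simp [h0, show ¬ 0 < M by omega, vAL, vBL]
    · have hlt : (PySem.Int.floordiv M 10).toNat ≤ n := by
        rw [PySem.Int.floordiv_eq_ediv_of_pos (by norm_num : (0:Int) < 10)]; omega
      rw [find_alt, digs]
      simp only [h0, dite_false, show 0 < M by omega, dite_true, ih _ hlt]
      by_cases h4 : M % 10 = 4 <;>
        simp [h4, vAL, vBL, rmap, Prod.ext_iff] <;>
        first
          | (constructor <;> ring)
          | ring

lemma findLoop_eq (N : Int) (record num : List Int) :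
    findLoop N record num = (record ++ (digs N).map rmap, num ++ (digs N).map nmap) := by
  suffices h : ∀ (n : Nat) (M : Int), M.toNat ≤ n → ∀ (record num : List Int),
      findLoop M record num = (record ++ (digs M).map rmap, num ++ (digs M).map nmap) from
    h N.toNat N le_rfl record num
  intro n
  induction n with
  | zero =>
    intro M hM record num
    rw [findLoop, digs]
    simp [show ¬ M > 0 by omega]
  | succ n ih =>
    intro M hM record num
    by_cases h0 : M > 0
    · have hlt : (PySem.Int.floordiv M 10).toNat ≤ n := by
        rw [PySem.Int.floordiv_eq_ediv_of_pos (by norm_num : (0:Int) < 10)]; omega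
      rw [findLoop, digs]
      simp only [h0, dite_true]
      have ih' := ih _ hlt
      rw [PySem.Int.floordiv_eq_ediv_of_pos (by norm_num : (0:Int) < 10)] at ih'
      by_cases h4 : M % 10 = 4 <;>
        simp [h4, ih', rmap, nmap]
    · rw [findLoop, digs]
      simp [h0]

lemma foldl_step_eq (ds : List Int) : ∀ (pre : List Int) (A B : Int),
    ((PySem.List.enumerate (ds.map rmap) (pre.length : Int)).foldl findStep (A, B, pre ++ ds.map nmap)).1
      = A + 10 ^ pre.length * vAL ds ∧
    ((PySem.List.enumerate (ds.map rmap) (pre.length : Int)).foldl findStep (A, B, pre ++ ds.map nmap)).2.1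
      = B + 10 ^ pre.length * vBL ds := by
  induction ds with
  | nil => intro pre A B; simp [vAL, vBL]
  | cons d ds ih =>
    intro pre A B
    rw [List.map_cons, List.map_cons, PySem.List.enumerate_cons, List.foldl_cons]
    have hstep : findStep (A, B, pre ++ nmap d :: ds.map nmap) ((pre.length : Int), rmap d)
        = (A + 10 ^ pre.length * rmap d,
           B + (if d = 4 then 10 ^ pre.length * rmap d else 0),
           (pre ++ [if d = 4 then 0 else nmap d - 1]) ++ ds.map nmap) := by
      by_cases h4 : d = 4 <;>
        simp [findStep, nmap, h4, List.getD]
    have hlen : ((pre.length : Int) + 1) = (((pre ++ [if d = 4 then 0 else nmap d - 1]).length : Int)) := by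
      simp
    rw [hstep, hlen]
    have h := ih (pre ++ [if d = 4 then 0 else nmap d - 1]) (A + 10 ^ pre.length * rmap d)
      (B + (if d = 4 then 10 ^ pre.length * rmap d else 0))
    refine ⟨h.1.trans ?_, h.2.trans ?_⟩
    · simp [vAL]; ring
    · by_cases h4 : d = 4 <;>
        · simp [vBL, h4, rmap]
          ring

-- ===== VERDICT (by name: the statement is the Claim_ definition above) =====
theorem find_spec : Claim_equal_find := by
  intro N _
  show find N = find_alt N
  rw [find_alt_eq]
  simp only [find, findLoop_eq N [] []]
  have h := foldl_step_eq (digs N) [] 0 0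
  simp only [List.length_nil, List.nil_append, Nat.cast_zero, pow_zero, one_mul, zero_add] at h
  exact Prod.ext h.1 h.2
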